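-- pv_equiv track=rewrite | github.com/ShriniwasAhirrao/ParseIQ | step2_llm_enricher/llm_agent.py | _are_field_names_similar
-- ===== SOURCE A (Python) =====
-- def _are_field_names_similar(name1: str, name2: str) -> bool:
--     """Check if two field names are similar enough to be considered related"""
--     name1_clean = name1.lower().replace('_', '').replace('-', '')
--     name2_clean = name2.lower().replace('_', '').replace('-', '')
--
--     # Check if one is contained in the other
--     if name1_clean in name2_clean or name2_clean in name1_clean:
--         return True
--
--     # Check for common prefixes/suffixes
--     common_parts = ['id', 'code', 'number', 'key', 'ref', 'date', 'time']
--
--     for part in common_parts: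
--         if (name1_clean.endswith(part) and name2_clean.endswith(part)) or \
--         (name1_clean.startswith(part) and name2_clean.startswith(part)):
--             return True
--
--     return False
-- ===== SOURCE B (Python) =====
-- COMMON_PARTS = ('id', 'code', 'number', 'key', 'ref', 'date', 'time')
--
--
-- def _common_prefix(a: str, b: str) -> str:
--     """Longest common prefix of a and b, via a zip scan."""
--     out = []
--     for x, y in zip(a, b):
--         if x != y:
--             break
--         out.append(x)
--     return ''.join(out)
--
--
-- def _are_field_names_similar(name1: str, name2: str) -> bool:
--     n1 = name1.lower().replace('_', '').replace('-', '')
--     n2 = name2.lower().replace('_', '').replace('-', '')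
--
--     if n1 in n2 or n2 in n1:
--         return True
--
--     # A part is a common prefix of both names iff it is a prefix of their
--     # longest common prefix; dually for suffixes (via reversal).
--     lcp = _common_prefix(n1, n2)
--     rsuf = _common_prefix(n1[::-1], n2[::-1])
--     return any(lcp.startswith(p) or rsuf.startswith(p[::-1]) for p in COMMON_PARTS)
-- ===== Notes on version B (the rewrite author's own statement) =====
-- stated objective: alternative
-- what changed: Instead of scanning the common-parts list testing prefix/suffix of both names per part with early return, B computes the longest common prefix and (via reversal) longest common suffix of the cleaned names once and then checks each common part against those two strings.
import Mathlib
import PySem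

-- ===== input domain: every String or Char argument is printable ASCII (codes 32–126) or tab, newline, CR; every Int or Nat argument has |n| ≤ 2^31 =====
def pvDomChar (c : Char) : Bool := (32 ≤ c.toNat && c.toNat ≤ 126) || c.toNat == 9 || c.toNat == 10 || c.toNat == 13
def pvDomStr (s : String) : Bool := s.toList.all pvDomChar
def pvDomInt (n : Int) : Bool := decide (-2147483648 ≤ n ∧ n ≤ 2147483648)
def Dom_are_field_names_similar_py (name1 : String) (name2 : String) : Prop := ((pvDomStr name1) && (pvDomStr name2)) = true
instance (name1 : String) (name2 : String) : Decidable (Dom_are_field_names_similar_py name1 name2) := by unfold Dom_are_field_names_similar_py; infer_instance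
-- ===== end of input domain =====

-- B replaces A's per-part combined prefix/suffix scan by computing the longest common
-- prefix and (reversed) longest common suffix once and testing each part against those
-- (objective: alternative decomposition, same cost).


-- ===== PORT A =====
-- name.lower().replace('_', '').replace('-', ''), on the List Char side
def pvClean (name : String) : List Char :=
  PySem.Chars.replace (PySem.Chars.replace (PySem.Chars.lower name.toList) ['_'] []) ['-'] []

def pvCommonParts : List (List Char) :=
  [['i','d'], ['c','o','d','e'], ['n','u','m','b','e','r'], ['k','e','y'],
   ['r','e','f'], ['d','a','t','e'], ['t','i','m','e']]

-- the 'for part in common_parts' loop with its early return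
def pvLoopA (n1 n2 : List Char) : List (List Char) → Bool
  | [] => false
  | p :: ps =>
    if (PySem.Chars.endswith n1 p && PySem.Chars.endswith n2 p)
        || (PySem.Chars.startswith n1 p && PySem.Chars.startswith n2 p) then true
    else pvLoopA n1 n2 ps

def are_field_names_similar_py (name1 : String) (name2 : String) : Bool :=
  let n1 := pvClean name1
  let n2 := pvClean name2
  if PySem.Chars.isIn n1 n2 || PySem.Chars.isIn n2 n1 then true
  else pvLoopA n1 n2 pvCommonParts

-- ===== PORT B =====
-- _common_prefix: zip scan with break, collecting matching leading characters
def pvLcpGo : List (Char × Char) → List Char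
  | [] => []
  | (x, y) :: rest => if x ≠ y then [] else x :: pvLcpGo rest

def pvCommonPrefix (a b : List Char) : List Char := pvLcpGo (a.zip b)

def are_field_names_similar_py_alt (name1 : String) (name2 : String) : Bool :=
  let n1 := pvClean name1
  let n2 := pvClean name2
  if PySem.Chars.isIn n1 n2 || PySem.Chars.isIn n2 n1 then true
  else
    let lcp := pvCommonPrefix n1 n2
    let rsuf := pvCommonPrefix n1.reverse n2.reverse
    pvCommonParts.any fun p =>
      PySem.Chars.startswith lcp p || PySem.Chars.startswith rsuf p.reverse

-- ===== PRECONDITION & SPEC =====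
def Spec_are_field_names_similar_py (name1 : String) (name2 : String) (out : Bool) : Prop := out = are_field_names_similar_py_alt name1 name2
instance (name1 : String) (name2 : String) (out : Bool) : Decidable (Spec_are_field_names_similar_py name1 name2 out) := by unfold Spec_are_field_names_similar_py; infer_instance

-- ===== CLAIM (what is proved, stated in full; the proofs are below) =====
def Claim_equal_are_field_names_similar_py : Prop := ∀ (name1 : String) (name2 : String), Dom_are_field_names_similar_py name1 name2 → Spec_are_field_names_similar_py name1 name2 (are_field_names_similar_py name1 name2)

-- ===== LEMMAS AND PROOFS =====

-- p is a prefix of the longest common prefix iff it is a prefix of both strings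
theorem prefix_commonPrefix_iff (p a b : List Char) :
    p <+: pvCommonPrefix a b ↔ p <+: a ∧ p <+: b := by
  induction p generalizing a b with
  | nil => simp
  | cons x xs ih =>
    cases a with
    | nil => simp [pvCommonPrefix, pvLcpGo]
    | cons c as =>
      cases b with
      | nil => simp [pvCommonPrefix, pvLcpGo]
      | cons d bs =>
        by_cases hcd : c = d
        · subst hcd
          simp only [pvCommonPrefix, List.zip_cons_cons, pvLcpGo, ne_eq, not_true_eq_false,
            if_false, List.cons_prefix_cons]
          rw [show pvLcpGo (as.zip bs) = pvCommonPrefix as bs from rfl, ih]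
          tauto
        · simp only [pvCommonPrefix, List.zip_cons_cons, pvLcpGo, ne_eq, hcd,
            not_false_eq_true, if_true, List.cons_prefix_cons]
          constructor
          · intro h; exact absurd h (by simp)
          · rintro ⟨⟨rfl, -⟩, ⟨h, -⟩⟩; exact absurd h hcd

theorem startswith_commonPrefix (p a b : List Char) :
    PySem.Chars.startswith (pvCommonPrefix a b) p
      = (PySem.Chars.startswith a p && PySem.Chars.startswith b p) := by
  apply Bool.eq_iff_iff.mpr
  simp [PySem.Chars.startswith_iff, prefix_commonPrefix_iff]

-- endswith via reversal
theorem endswith_eq_startswith_reverse (s p : List Char) :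
    PySem.Chars.endswith s p = PySem.Chars.startswith s.reverse p.reverse := by
  apply Bool.eq_iff_iff.mpr
  simp [PySem.Chars.endswith_iff, PySem.Chars.startswith_iff, List.reverse_prefix]

-- A's per-part condition equals B's per-part condition
theorem cond_eq (n1 n2 p : List Char) :
    ((PySem.Chars.endswith n1 p && PySem.Chars.endswith n2 p)
      || (PySem.Chars.startswith n1 p && PySem.Chars.startswith n2 p))
    = (PySem.Chars.startswith (pvCommonPrefix n1 n2) p
      || PySem.Chars.startswith (pvCommonPrefix n1.reverse n2.reverse) p.reverse) := by
  rw [startswith_commonPrefix, startswith_commonPrefix,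
    endswith_eq_startswith_reverse n1, endswith_eq_startswith_reverse n2, Bool.or_comm]

-- A's scan equals B's any over the same part list
theorem loopA_eq_any (n1 n2 : List Char) (ps : List (List Char)) :
    pvLoopA n1 n2 ps
      = ps.any (fun p =>
          PySem.Chars.startswith (pvCommonPrefix n1 n2) p
            || PySem.Chars.startswith (pvCommonPrefix n1.reverse n2.reverse) p.reverse) := by
  induction ps with
  | nil => rfl
  | cons p ps ih =>
    simp only [pvLoopA, List.any_cons, ih, cond_eq]
    cases hD : (PySem.Chars.startswith (pvCommonPrefix n1 n2) p
        || PySem.Chars.startswith (pvCommonPrefix n1.reverse n2.reverse) p.reverse) <;>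
      simp

-- ===== VERDICT (by name: the statement is the Claim_ definition above) =====
theorem are_field_names_similar_py_spec : Claim_equal_are_field_names_similar_py := by
  intro name1 name2 _
  unfold Spec_are_field_names_similar_py are_field_names_similar_py are_field_names_similar_py_alt
  simp only [loopA_eq_any]
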